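-- pv_equiv track=rewrite | github.com/HXLH50K/Leetcode | 809.py | isExpressived
-- ===== SOURCE A (Python) =====
-- def isExpressived(s, word):
--     i = j = 0
--     while i < len(s) and j < len(word):
--         if s[i] != word[j]:
--             return False
--         c = s[i]
--
--         cnts = 0
--         while i < len(s) and s[i] == c:
--             i += 1
--             cnts += 1
--
--         cntw = 0
--         while j < len(word) and word[j] == c:
--             j += 1
--             cntw += 1
--
--         if cnts < cntw:
--             return False
--         if cnts > cntw and cnts < 3:
--             return False
--     return i == len(s) and j == len(word)
-- ===== SOURCE B (Python) =====
-- def isExpressived(s, word):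
--     def rle(t):
--         groups = []
--         for ch in t:
--             if groups and groups[-1][0] == ch:
--                 groups[-1][1] += 1
--             else:
--                 groups.append([ch, 1])
--         return groups
--     gs, gw = rle(s), rle(word)
--     if len(gs) != len(gw):
--         return False
--     for (cs, ns), (cw, nw) in zip(gs, gw):
--         if cs != cw or ns < nw or (ns > nw and ns < 3):
--             return False
--     return True
-- ===== Notes on version B (the rewrite author's own statement) =====
-- stated objective: simpler
-- what changed: Replaces the interleaved two-pointer run-consuming while loops with a run-length-encode-both-strings step followed by a flat zip-and-compare pass.
import Mathlib
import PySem

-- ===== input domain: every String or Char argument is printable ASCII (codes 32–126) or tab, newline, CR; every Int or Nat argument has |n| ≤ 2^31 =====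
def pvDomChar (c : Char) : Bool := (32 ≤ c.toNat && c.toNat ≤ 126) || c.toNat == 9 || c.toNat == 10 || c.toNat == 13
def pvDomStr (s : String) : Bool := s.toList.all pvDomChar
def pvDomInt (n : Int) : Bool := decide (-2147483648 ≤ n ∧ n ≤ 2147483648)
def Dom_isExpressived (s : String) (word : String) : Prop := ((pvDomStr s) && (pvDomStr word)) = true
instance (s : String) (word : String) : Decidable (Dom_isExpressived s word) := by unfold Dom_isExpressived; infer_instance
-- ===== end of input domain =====

-- B replaces A's interleaved two-pointer run-consuming loops with run-length encoding
-- of both strings followed by one zip-and-compare pass (objective: simpler decomposition).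


-- ===== PORT A =====
-- A's inner 'while i < len(s) and s[i] == c: i += 1; cnts += 1' on the remaining suffix:
-- returns (count, rest-of-suffix).
def pvCountRun (c : Char) : List Char → Nat × List Char
  | [] => (0, [])
  | x :: xs =>
    if x = c then ((pvCountRun c xs).1 + 1, (pvCountRun c xs).2)
    else (0, x :: xs)

theorem pvCountRun_len_le (c : Char) (xs : List Char) : (pvCountRun c xs).2.length ≤ xs.length := by
  induction xs with
  | nil => simp [pvCountRun]
  | cons x xs ih =>
    simp only [pvCountRun]
    split
    · simpa using Nat.le_succ_of_le ih
    · simp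

-- A's outer while loop, on the suffixes s[i:], word[j:]; exits with 'i == len(s) and j == len(word)'.
def pvLoopA : List Char → List Char → Bool
  | a :: ss, b :: ws =>
    if a ≠ b then false
    else
      let cnts := (pvCountRun a (a :: ss)).1
      let ss' := (pvCountRun a (a :: ss)).2
      let cntw := (pvCountRun a (b :: ws)).1
      let ws' := (pvCountRun a (b :: ws)).2
      if cnts < cntw then false
      else if cnts > cntw ∧ cnts < 3 then false
      else pvLoopA ss' ws'
  | ss, ws => ss.isEmpty && ws.isEmpty
termination_by ss => ss.length
decreasing_by
  have := pvCountRun_len_le a ss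
  simp [ss', pvCountRun]
  omega

def isExpressived (s : String) (word : String) : Bool := pvLoopA s.toList word.toList

-- ===== PORT B =====
-- Source B's rle: fold over the characters, incrementing the last group or appending a new one.
def pvRleStep (groups : List (Char × Nat)) (ch : Char) : List (Char × Nat) :=
  match groups.getLast? with
  | some (c, n) => if c = ch then groups.dropLast ++ [(c, n + 1)] else groups ++ [(ch, 1)]
  | none => [(ch, 1)]

def pvRle (t : List Char) : List (Char × Nat) := t.foldl pvRleStep []

def isExpressived_alt (s : String) (word : String) : Bool :=
  let gs := pvRle s.toList
  let gw := pvRle word.toList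
  if gs.length ≠ gw.length then false
  else (gs.zip gw).all fun p =>
    ¬(p.1.1 ≠ p.2.1 ∨ p.1.2 < p.2.2 ∨ (p.1.2 > p.2.2 ∧ p.1.2 < 3))

-- ===== PRECONDITION & SPEC =====
def Spec_isExpressived (s : String) (word : String) (out : Bool) : Prop := out = isExpressived_alt s word
instance (s : String) (word : String) (out : Bool) : Decidable (Spec_isExpressived s word out) := by unfold Spec_isExpressived; infer_instance

-- ===== CLAIM (what is proved, stated in full; the proofs are below) =====
def Claim_equal_isExpressived : Prop := ∀ (s : String) (word : String), Dom_isExpressived s word → Spec_isExpressived s word (isExpressived s word)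

-- ===== LEMMAS AND PROOFS =====

-- Span-based run-length encoding, used as the bridge between the two ports.
def pvRleR : List Char → List (Char × Nat)
  | [] => []
  | x :: xs => (x, (pvCountRun x xs).1 + 1) :: pvRleR (pvCountRun x xs).2
termination_by xs => xs.length
decreasing_by
  have := pvCountRun_len_le x xs
  simp only [List.length_cons]
  omega

theorem pvRle_foldl_concat (xs : List Char) (acc : List (Char × Nat)) (c : Char) (n : Nat) :
    List.foldl pvRleStep (acc ++ [(c, n)]) xs =
      acc ++ ((c, n + (pvCountRun c xs).1) :: pvRleR (pvCountRun c xs).2) := by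
  induction xs generalizing acc c n with
  | nil => simp [pvCountRun, pvRleR]
  | cons x xs ih =>
    by_cases h : x = c
    · subst h
      have hstep : pvRleStep (acc ++ [(x, n)]) x = acc ++ [(x, n + 1)] := by
        simp [pvRleStep]
      simp only [List.foldl_cons, hstep, ih, pvCountRun, if_pos rfl]
      rcases hc : pvCountRun x xs with ⟨m, r⟩
      simp [hc]
      omega
    · have hstep : pvRleStep (acc ++ [(c, n)]) x = (acc ++ [(c, n)]) ++ [(x, 1)] := by
        simp [pvRleStep, Ne.symm h]
      simp only [List.foldl_cons, hstep, ih]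
      rcases hc : pvCountRun x xs with ⟨m, r⟩
      simp [pvCountRun, h, pvRleR, hc, Nat.add_comm]

theorem pvRle_eq_pvRleR (t : List Char) : pvRle t = pvRleR t := by
  cases t with
  | nil => simp [pvRle, pvRleR]
  | cons x xs =>
    have h := pvRle_foldl_concat xs [] x 1
    simp only [List.nil_append] at h
    simp only [pvRle, List.foldl_cons, pvRleStep, List.getLast?_nil, h, pvRleR]
    simp [Nat.add_comm]

-- B's length-check + zip-check on two group lists.
def pvCheck (gs gw : List (Char × Nat)) : Bool :=
  if gs.length ≠ gw.length then false
  else (gs.zip gw).all fun p =>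
    ¬(p.1.1 ≠ p.2.1 ∨ p.1.2 < p.2.2 ∨ (p.1.2 > p.2.2 ∧ p.1.2 < 3))

theorem pvCheck_cons_same (c : Char) (n m : Nat) (gs gw : List (Char × Nat)) :
    pvCheck ((c, n) :: gs) ((c, m) :: gw) =
      (decide ¬(n < m ∨ (n > m ∧ n < 3)) && pvCheck gs gw) := by
  simp only [pvCheck, List.length_cons, List.zip_cons_cons, List.all_cons]
  by_cases hlen : gs.length = gw.length
  · simp [hlen]
  · simp [hlen]

theorem pvLoopA_eq_check (ss ws : List Char) :
    pvLoopA ss ws = pvCheck (pvRleR ss) (pvRleR ws) := by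
  induction ss using pvRleR.induct generalizing ws with
  | case1 =>
    cases ws with
    | nil => simp [pvLoopA, pvRleR, pvCheck]
    | cons b ws =>
      rw [pvLoopA]
      · simp [pvRleR, pvCheck]
      · rintro a ss b' ws' h; cases h
  | case2 x xs ih =>
    cases ws with
    | nil =>
      rw [pvLoopA]
      · simp [pvRleR, pvCheck]
      · rintro a ss b' ws' _ h; cases h
    | cons b ws =>
      rw [pvLoopA]
      rw [pvRleR, pvRleR]
      by_cases hab : x = b
      · subst hab
        have hs : pvCountRun x (x :: xs) = ((pvCountRun x xs).1 + 1, (pvCountRun x xs).2) := by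
          simp [pvCountRun]
        have hw : pvCountRun x (x :: ws) = ((pvCountRun x ws).1 + 1, (pvCountRun x ws).2) := by
          simp [pvCountRun]
        simp only [ne_eq, not_true_eq_false, if_false, hs, hw, pvCheck_cons_same]
        have ihr := ih
        generalize (pvCountRun x xs).2 = r at ihr ⊢
        generalize (pvCountRun x xs).1 = n
        generalize (pvCountRun x ws).2 = rw'
        generalize (pvCountRun x ws).1 = m
        by_cases h1 : n + 1 < m + 1
        · simp [h1]
        · by_cases h2 : n + 1 > m + 1 ∧ n + 1 < 3
          · simp only [if_neg h1, if_pos h2]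
            simp [h2]
          · simp only [if_neg h1, if_neg h2, ihr]
            have hd : ¬(n + 1 < m + 1 ∨ (n + 1 > m + 1 ∧ n + 1 < 3)) := by tauto
            simp [hd]
            intro _
            omega
      · simp only [ne_eq, hab, not_false_eq_true, if_true, pvCheck, List.length_cons,
          List.zip_cons_cons, List.all_cons]
        by_cases hlen : (pvRleR (pvCountRun x xs).2).length = (pvRleR (pvCountRun x ws).2).length
        · simp [hlen, hab]
        · simp [hlen]

-- ===== VERDICT (by name: the statement is the Claim_ definition above) =====
theorem isExpressived_spec : Claim_equal_isExpressived := by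
  intro s word _
  unfold Spec_isExpressived isExpressived isExpressived_alt
  rw [pvLoopA_eq_check, pvRle_eq_pvRleR, pvRle_eq_pvRleR]
  rfl
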